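-- pv_equiv track=rewrite | github.com/jerry81/Project-Euler-Solutions | src/utils/myitertools.py | getAllPerms
-- ===== SOURCE A (Python) =====
-- def swap(arr, idx1, idx2):
--   arr[idx1], arr[idx2] = arr[idx2], arr[idx1]
--   return arr
--
-- def reverseSlice(arr, idx1, idx2):
--   sliced = arr[idx1:idx2+1]
--   prefix = arr[0:idx1]
--   reversedSlice = sliced[::-1]
--   return prefix + reversedSlice
--
-- def getNextPermutation(input):
--   ret = input[:]
--   for pivot in range(len(ret) - 2, -1, -1):
--     pivotValue = ret[pivot]
--     for i in range(len(ret) - 1, pivot, -1):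
--       cur = ret[i]
--       if pivotValue < cur:
--         ret = swap(ret[:], i, pivot)
--         ret = reverseSlice(ret[:], pivot + 1, len(ret))
--         return ret
--   return ret
--
-- def getAllPerms(nextPerm):
--   allItems = [nextPerm]
--   while True:
--     prev = nextPerm
--     nextPerm = getNextPermutation(nextPerm[:])
--     if (prev == nextPerm):
--       break
--     else:
--       allItems.append(nextPerm)
--   return allItems
-- ===== SOURCE B (Python) =====
-- def getAllPerms(nextPerm):
--     # Enumerate ALL distinct permutations of the multiset at once (building the
--     # set of permutations by inserting each element at every position), then
--     # sort them lexicographically and keep those >= the starting permutation.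
--     perms = {()}
--     for x in nextPerm:
--         perms = {p[:i] + (x,) + p[i:] for p in perms for i in range(len(p) + 1)}
--     return [list(p) for p in sorted(perms) if list(p) >= nextPerm]
-- ===== Notes on version B (the rewrite author's own statement) =====
-- stated objective: alternative
-- what changed: A walks from the start permutation applying an in-place next-permutation step until a fixed point; B instead enumerates the set of all distinct permutations of the multiset at once (building it by inserting each element at every position), sorts it lexicographically and keeps those >= the start.
import Mathlib
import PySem

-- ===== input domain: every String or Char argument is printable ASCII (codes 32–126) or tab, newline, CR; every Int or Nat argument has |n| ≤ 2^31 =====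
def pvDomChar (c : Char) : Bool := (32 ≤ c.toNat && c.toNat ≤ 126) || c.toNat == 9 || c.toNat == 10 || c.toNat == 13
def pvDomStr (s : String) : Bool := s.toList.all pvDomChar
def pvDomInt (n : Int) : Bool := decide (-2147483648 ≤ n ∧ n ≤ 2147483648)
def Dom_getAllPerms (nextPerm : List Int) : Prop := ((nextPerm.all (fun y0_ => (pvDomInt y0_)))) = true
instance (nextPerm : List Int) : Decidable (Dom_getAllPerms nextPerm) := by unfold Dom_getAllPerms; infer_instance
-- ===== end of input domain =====

-- B replaces A's incremental next-permutation chaining by enumerating the set of all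
-- distinct permutations at once, sorting it and filtering (alternative algorithm, similar cost).

-- ===== PORT A =====
-- swap(arr, idx1, idx2); all call sites use in-range indices, so the fallback branch is unreachable
def pySwap (arr : List Int) (idx1 idx2 : Int) : List Int :=
  match PySem.List.pyGet? arr idx1, PySem.List.pyGet? arr idx2 with
  | some v1, some v2 => PySem.List.pySetD (PySem.List.pySetD arr idx1 v2) idx2 v1
  | _, _ => arr

-- reverseSlice(arr, idx1, idx2)
def pyReverseSlice (arr : List Int) (idx1 idx2 : Int) : List Int :=
  let sliced := PySem.List.slice arr (some idx1) (some (idx2 + 1))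
  let pre := PySem.List.slice arr (some 0) (some idx1)
  let reversedSlice := (PySem.List.slice? sliced none none (-1)).getD []  -- sliced[::-1]; step -1 ≠ 0, never none
  pre ++ reversedSlice

-- inner 'for i in range(len(ret)-1, pivot, -1)' loop of getNextPermutation, early return as Option
def npInner (ret : List Int) (pivotValue : Int) (pivot : Int) : List Int → Option (List Int)
  | [] => none
  | i :: rest =>
    match PySem.List.pyGet? ret i with
    | none => none  -- unreachable: i is always in range
    | some cur =>
      if pivotValue < cur then
        let r1 := pySwap ret i pivot
        some (pyReverseSlice r1 (pivot + 1) (PySem.List.len r1))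
      else npInner ret pivotValue pivot rest

-- outer 'for pivot in range(len(ret)-2, -1, -1)' loop
def npOuter (ret : List Int) : List Int → List Int
  | [] => ret
  | pivot :: rest =>
    match PySem.List.pyGet? ret pivot with
    | none => ret  -- unreachable: pivot is always in range
    | some pivotValue =>
      match npInner ret pivotValue pivot (PySem.List.pyRange (PySem.List.len ret - 1) pivot (-1)) with
      | some r => r
      | none => npOuter ret rest

def getNextPermutation (input : List Int) : List Int :=
  npOuter input (PySem.List.pyRange (PySem.List.len input - 2) (-1) (-1))

-- the 'while True' loop; the fuel only makes it total (n!+1 steps provably suffice, see the lemmas)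
def gapLoop : Nat → List (List Int) → List Int → List (List Int)
  | 0, allItems, _ => allItems
  | fuel + 1, allItems, np =>
    let next := getNextPermutation np
    if np = next then allItems
    else gapLoop fuel (allItems ++ [next]) next

def getAllPerms (nextPerm : List Int) : List (List Int) :=
  gapLoop (Nat.factorial nextPerm.length + 1) [nextPerm] nextPerm

-- ===== PORT B =====
-- {p[:i] + (x,) + p[i:] for i in range(len(p)+1)}  (inner generator of the set comprehension)
def insertAll (x : Int) (p : List Int) : List (List Int) :=
  (PySem.List.pyRange 0 (PySem.List.len p + 1) 1).map
    (fun i => PySem.List.slice p none (some i) ++ [x] ++ PySem.List.slice p (some i) none)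

def getAllPerms_alt (nextPerm : List Int) : List (List Int) :=
  let perms : PySem.Set (List Int) :=
    nextPerm.foldl (fun perms x => PySem.Set.ofList (perms.flatMap (insertAll x)))
      (PySem.Set.ofList [[]])
  (PySem.List.sorted perms (fun p => p) false).filter (fun p => decide (nextPerm ≤ p))

-- ===== PRECONDITION & SPEC =====
def Spec_getAllPerms (nextPerm : List Int) (out : List (List Int)) : Prop :=
  out = getAllPerms_alt nextPerm
instance (nextPerm : List Int) (out : List (List Int)) : Decidable (Spec_getAllPerms nextPerm out) := by
  unfold Spec_getAllPerms; infer_instance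

-- ===== CLAIM =====
def Claim_equal_getAllPerms : Prop :=
  ∀ (nextPerm : List Int), Dom_getAllPerms nextPerm → Spec_getAllPerms nextPerm (getAllPerms nextPerm)

-- ===== LEMMAS AND PROOFS =====

-- weakly decreasing (non-increasing): the lexicographically largest arrangement of its multiset
def WD (l : List Int) : Prop := l.Pairwise (fun a b => b ≤ a)

-- m is the immediate lexicographic successor of l among permutations of l
def IsNext (l m : List Int) : Prop :=
  m.Perm l ∧ l < m ∧ ∀ k : List Int, k.Perm l → l < k → m ≤ k

-- Option-valued view of npOuter (to state the early-return behaviour)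
def npOuterO (ret : List Int) : List Int → Option (List Int)
  | [] => none
  | pivot :: rest =>
    match PySem.List.pyGet? ret pivot with
    | none => none
    | some pivotValue =>
      match npInner ret pivotValue pivot (PySem.List.pyRange (PySem.List.len ret - 1) pivot (-1)) with
      | some r => some r
      | none => npOuterO ret rest

lemma npOuter_eq_npOuterO (ret : List Int) : ∀ ps : List Int,
    npOuter ret ps = (npOuterO ret ps).getD ret := by
  intro ps
  induction ps with
  | nil => rfl
  | cons pivot rest ih =>
    cases h1 : PySem.List.pyGet? ret pivot with
    | none => simp [npOuter, npOuterO, h1]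
    | some pv =>
      cases h2 : npInner ret pv pivot (PySem.List.pyRange (PySem.List.len ret - 1) pivot (-1)) with
      | some r =>
        simp only [PySem.List.len_eq] at h2
        simp [npOuter, npOuterO, h1, h2]
      | none =>
        simp only [PySem.List.len_eq] at h2
        simp [npOuter, npOuterO, h1, h2, ih]

lemma npOuterO_append (ret : List Int) : ∀ ps qs : List Int,
    (∀ p ∈ ps, (PySem.List.pyGet? ret p).isSome) →
    npOuterO ret (ps ++ qs) = (npOuterO ret ps).orElse (fun _ => npOuterO ret qs) := by
  intro ps qs h
  induction ps with
  | nil => simp [npOuterO, Option.orElse]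
  | cons pivot rest ih =>
    obtain ⟨pv, hpv⟩ := Option.isSome_iff_exists.mp (h pivot (by simp))
    cases h2 : npInner ret pv pivot (PySem.List.pyRange (PySem.List.len ret - 1) pivot (-1)) with
    | some r =>
      simp only [PySem.List.len_eq] at h2
      simp [npOuterO, hpv, h2, Option.orElse]
    | none =>
      simp only [List.cons_append, npOuterO, hpv, h2]
      exact ih (fun p hp => h p (by simp [hp]))

lemma npInner_skip (ret : List Int) (pv p : Int) : ∀ is1 is2 : List Int,
    (∀ i ∈ is1, ∃ c, PySem.List.pyGet? ret i = some c ∧ ¬ pv < c) →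
    npInner ret pv p (is1 ++ is2) = npInner ret pv p is2 := by
  intro is1 is2 h
  induction is1 with
  | nil => simp
  | cons i rest ih =>
    obtain ⟨c, hc, hlt⟩ := h i (by simp)
    simp only [List.cons_append, npInner, hc, if_neg hlt]
    exact ih (fun j hj => h j (by simp [hj]))

lemma npInner_none (ret : List Int) (pv p : Int) : ∀ is : List Int,
    (∀ i ∈ is, ∀ c : Int, PySem.List.pyGet? ret i = some c → ¬ pv < c) →
    npInner ret pv p is = none := by
  intro is h
  induction is with
  | nil => rfl
  | cons i rest ih =>
    cases hc : PySem.List.pyGet? ret i with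
    | none => simp [npInner, hc]
    | some c =>
      simp only [npInner, hc, if_neg (h i (by simp) c hc)]
      exact ih (fun j hj => h j (by simp [hj]))

-- lexicographic order toolkit (default instances: List.instLT / List.LE')
lemma cons_le_cons_same (a : Int) {l m : List Int} (h : l ≤ m) : a :: l ≤ a :: m := by
  rw [← not_lt] at h ⊢
  intro hc
  rcases List.cons_lt_cons_iff.mp hc with h1 | ⟨-, h2⟩
  · exact lt_irrefl a h1
  · exact h h2

-- a non-decreasing list is lexicographically least among its permutations
lemma sorted_le_lex : ∀ s : List Int, ∀ m : List Int, s.Pairwise (· ≤ ·) → m.Perm s → s ≤ m := by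
  intro s
  induction s with
  | nil =>
    intro m _ hp
    rw [List.perm_nil.mp hp]
  | cons a s ih =>
    intro m hs hp
    cases m with
    | nil => exact absurd hp.length_eq (by simp)
    | cons b t =>
      have hb : b ∈ a :: s := hp.subset (List.mem_cons_self ..)
      have hab : a ≤ b := by
        rcases List.mem_cons.mp hb with h | h
        · exact le_of_eq h.symm
        · exact (List.pairwise_cons.mp hs).1 b h
      rcases lt_or_eq_of_le hab with hlt | heq
      · exact le_of_lt (List.cons_lt_cons_iff.mpr (Or.inl hlt))
      · subst heq
        exact cons_le_cons_same a (ih t (List.pairwise_cons.mp hs).2 hp.cons_inv)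

-- a weakly decreasing list is lexicographically greatest among its permutations
lemma wd_ge_lex : ∀ s : List Int, ∀ m : List Int, WD s → m.Perm s → m ≤ s := by
  intro s
  induction s with
  | nil =>
    intro m _ hp
    rw [List.perm_nil.mp hp]
  | cons a s ih =>
    intro m hs hp
    cases m with
    | nil => exact absurd hp.length_eq (by simp)
    | cons b t =>
      have hb : b ∈ a :: s := hp.subset (List.mem_cons_self ..)
      have hab : b ≤ a := by
        rcases List.mem_cons.mp hb with h | h
        · exact le_of_eq h
        · exact (List.pairwise_cons.mp hs).1 b h
      rcases lt_or_eq_of_le hab with hlt | heq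
      · exact le_of_lt (List.cons_lt_cons_iff.mpr (Or.inl hlt))
      · subst heq
        exact cons_le_cons_same b (ih t (List.pairwise_cons.mp hs).2 hp.cons_inv)

lemma isnext_cons (x : Int) (l r : List Int) (h : IsNext l r) : IsNext (x :: l) (x :: r) := by
  obtain ⟨hperm, hlt, hmin⟩ := h
  refine ⟨hperm.cons x, List.cons_lt_cons_iff.mpr (Or.inr ⟨rfl, hlt⟩), ?_⟩
  intro k hk hklt
  cases k with
  | nil => exact absurd hk.length_eq (by simp)
  | cons k0 k1 =>
    rcases List.cons_lt_cons_iff.mp hklt with h1 | ⟨heq, h2⟩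
    · exact le_of_lt (List.cons_lt_cons_iff.mpr (Or.inl h1))
    · subst heq
      exact cons_le_cons_same x (hmin k1 hk.cons_inv h2)

lemma isnext_pivot0 (x b : Int) (u v : List Int) (hWD : WD (u ++ b :: v)) (hb : x < b)
    (hv : ∀ y ∈ v, y ≤ x) : IsNext (x :: (u ++ b :: v)) (b :: (u ++ x :: v).reverse) := by
  have hWD' : (u ++ b :: v).Pairwise (fun a c => c ≤ a) := hWD
  rw [List.pairwise_append] at hWD'
  obtain ⟨hu, hbv, hcross⟩ := hWD'
  have hub : ∀ a ∈ u, b ≤ a := fun a ha => hcross a ha b (by simp)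
  have hperm_chain : (b :: (u ++ x :: v)).Perm (x :: (u ++ b :: v)) :=
    ((List.perm_middle.cons b).trans (List.Perm.swap x b (u ++ v))).trans
      ((List.perm_middle.symm).cons x)
  have tailWD : WD (u ++ x :: v) := by
    have : (u ++ x :: v).Pairwise (fun a c => c ≤ a) := by
      rw [List.pairwise_append]
      refine ⟨hu, List.pairwise_cons.mpr ⟨hv, (List.pairwise_cons.mp hbv).2⟩, ?_⟩
      intro a ha y hy
      rcases List.mem_cons.mp hy with rfl | hy'
      · exact hb.le.trans (hub a ha)
      · exact ((hv y hy').trans hb.le).trans (hub a ha)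
    exact this
  have tailSorted : ((u ++ x :: v).reverse).Pairwise (· ≤ ·) := by
    rw [List.pairwise_reverse]
    exact tailWD
  refine ⟨((List.reverse_perm (u ++ x :: v)).cons b).trans hperm_chain, 
          List.cons_lt_cons_iff.mpr (Or.inl hb), ?_⟩
  intro k hk hklt
  cases k with
  | nil => exact absurd hk.length_eq (by simp)
  | cons k0 k1 =>
    rcases List.cons_lt_cons_iff.mp hklt with hxk | ⟨heq, htail⟩
    swap
    · subst heq
      have hk1 : k1.Perm (u ++ b :: v) := hk.cons_inv
      exact absurd htail (not_lt.mpr (wd_ge_lex _ k1 hWD hk1))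
    · have hk0mem : k0 ∈ x :: (u ++ b :: v) := hk.subset (by simp)
      have hbk0 : b ≤ k0 := by
        rcases List.mem_cons.mp hk0mem with rfl | hmem
        · exact absurd hxk (lt_irrefl k0)
        · rcases List.mem_append.mp hmem with hu' | hbv'
          · exact hub k0 hu'
          · rcases List.mem_cons.mp hbv' with heqb | hv'
            · exact le_of_eq heqb.symm
            · exact absurd hxk (not_lt.mpr (hv k0 hv'))
      rcases lt_or_eq_of_le hbk0 with hlt2 | heq2
      · exact le_of_lt (List.cons_lt_cons_iff.mpr (Or.inl hlt2))
      · subst heq2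
        have hk1 : k1.Perm (u ++ x :: v) :=
          (List.Perm.cons_inv (hk.trans hperm_chain.symm)).trans (List.Perm.refl _)
        refine cons_le_cons_same b (sorted_le_lex _ k1 tailSorted ?_)
        exact hk1.trans (List.reverse_perm (u ++ x :: v)).symm

-- decomposition of a weakly decreasing list at the last element exceeding x
lemma wd_decomp (x : Int) : ∀ l : List Int, WD l → (∃ y ∈ l, x < y) →
    ∃ u b v, l = u ++ b :: v ∧ x < b ∧ (∀ y ∈ v, y ≤ x) := by
  intro l
  induction l with
  | nil => rintro _ ⟨y, hy, -⟩; exact absurd hy (List.not_mem_nil)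
  | cons c t ih =>
    intro hWD hex
    by_cases hyt : ∃ y ∈ t, x < y
    · obtain ⟨u, b, v, heq, hbb, hvv⟩ := ih (List.pairwise_cons.mp hWD).2 hyt
      exact ⟨c :: u, b, v, by rw [heq, List.cons_append], hbb, hvv⟩
    · push_neg at hyt
      obtain ⟨y, hy, hxy⟩ := hex
      rcases List.mem_cons.mp hy with rfl | hmem
      · exact ⟨[], y, t, rfl, hxy, fun z hz => hyt z hz⟩
      · exact absurd hxy (not_lt.mpr (hyt y hmem))

-- countdown ranges: shift by one, and split
lemma pyRange_neg_shift (a b : Int) :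
    PySem.List.pyRange (a + 1) (b + 1) (-1) = (PySem.List.pyRange a b (-1)).map (· + 1) := by
  rw [PySem.List.pyRange_neg_one, PySem.List.pyRange_neg_one, List.map_map]
  have h : a + 1 - (b + 1) = a - b := by ring
  rw [h]
  apply List.map_congr_left
  intro k _
  simp only [Function.comp_apply]
  omega

lemma pyRange_neg_append (a m b : Int) (h1 : b ≤ m) (h2 : m ≤ a) :
    PySem.List.pyRange a b (-1) = PySem.List.pyRange a m (-1) ++ PySem.List.pyRange m b (-1) := by
  rw [PySem.List.pyRange_neg_one_eq_reverse a b, PySem.List.pyRange_neg_one_eq_reverse a m,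
    PySem.List.pyRange_neg_one_eq_reverse m b,
    PySem.List.pyRange_one_append (b + 1) (m + 1) (a + 1) (by omega) (by omega),
    List.reverse_append]

lemma slice_full_end (arr : List Int) (a b : Int) (ha : 0 ≤ a) (hb : (arr.length : Int) ≤ b) :
    PySem.List.slice arr (some a) (some b) = arr.drop a.toNat := by
  rw [PySem.List.slice_toNat arr ha (by omega)]
  exact List.take_of_length_le (by simp [List.length_drop]; omega)

lemma pySwap_cons (x : Int) (ret : List Int) (ni np : Nat) :
    pySwap (x :: ret) ((ni : Int) + 1) ((np : Int) + 1) = x :: pySwap ret (ni : Int) (np : Int) := by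
  simp only [pySwap, PySem.List.pyGet?_cons_succ]
  cases h1 : PySem.List.pyGet? ret (ni : Int) with
  | none =>
    cases h2 : PySem.List.pyGet? ret (np : Int) with
    | none => rfl
    | some v2 => rfl
  | some v1 =>
    cases h2 : PySem.List.pyGet? ret (np : Int) with
    | none => rfl
    | some v2 =>
      have e1 : ((ni : Int) + 1) = (((ni + 1 : Nat) : Int)) := by push_cast; ring
      have e2 : ((np : Int) + 1) = (((np + 1 : Nat) : Int)) := by push_cast; ring
      dsimp only
      rw [e1, e2, PySem.List.pySetD_natCast, PySem.List.pySetD_natCast,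
        PySem.List.pySetD_natCast, PySem.List.pySetD_natCast,
        List.set_cons_succ, List.set_cons_succ]

lemma pyReverseSlice_cons (x : Int) (s : List Int) (np : Nat) :
    pyReverseSlice (x :: s) ((np : Int) + 1 + 1) ((s.length : Int) + 1)
      = x :: pyReverseSlice s ((np : Int) + 1) (s.length : Int) := by
  simp only [pyReverseSlice, PySem.List.slice?_none_none_neg_one, Option.getD_some]
  have hfullL : PySem.List.slice (x :: s) (some ((np : Int) + 1 + 1)) (some ((s.length : Int) + 1 + 1))
      = s.drop (np + 1) := by
    rw [slice_full_end _ _ _ (by omega) (by rw [List.length_cons]; push_cast; omega)]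
    have : ((np : Int) + 1 + 1).toNat = np + 2 := by omega
    rw [this]
    simp [List.drop_succ_cons]
  have hfullR : PySem.List.slice s (some ((np : Int) + 1)) (some ((s.length : Int) + 1))
      = s.drop (np + 1) := by
    rw [slice_full_end _ _ _ (by omega) (by omega)]
    have : ((np : Int) + 1).toNat = np + 1 := by omega
    rw [this]
  have hpreL : PySem.List.slice (x :: s) (some 0) (some ((np : Int) + 1 + 1))
      = x :: s.take (np + 1) := by
    rw [show ((0 : Int) = ((0 : Nat) : Int)) from rfl]
    rw [PySem.List.slice_toNat _ (by omega) (by omega)]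
    have : ((np : Int) + 1 + 1).toNat = np + 2 := by omega
    simp [this]
  have hpreR : PySem.List.slice s (some 0) (some ((np : Int) + 1)) = s.take (np + 1) := by
    rw [show ((0 : Int) = ((0 : Nat) : Int)) from rfl]
    rw [PySem.List.slice_toNat _ (by omega) (by omega)]
    have : ((np : Int) + 1).toNat = np + 1 := by omega
    simp [this]
  rw [hfullL, hfullR, hpreL, hpreR, List.cons_append]

lemma npInner_shift (x : Int) (ret : List Int) (pv : Int) (np : Nat) :
    ∀ is : List Int, (∀ i ∈ is, 0 ≤ i) →
    npInner (x :: ret) pv ((np : Int) + 1) (is.map (· + 1))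
      = (npInner ret pv (np : Int) is).map (fun r => x :: r) := by
  intro is h
  induction is with
  | nil => simp [npInner]
  | cons i rest ih =>
    obtain ⟨n, rfl⟩ : ∃ n : Nat, i = (n : Int) := ⟨i.toNat, by have := h i (by simp); omega⟩
    simp only [List.map_cons, npInner, PySem.List.pyGet?_cons_succ]
    cases hg : PySem.List.pyGet? ret (n : Int) with
    | none => simp
    | some cur =>
      simp only
      by_cases hcur : pv < cur
      · rw [if_pos hcur, if_pos hcur]
        rw [pySwap_cons x ret n np]
        have hlen : PySem.List.len (x :: pySwap ret (n : Int) (np : Int))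
            = ((pySwap ret (n : Int) (np : Int)).length : Int) + 1 := by
          simp [PySem.List.len_eq]
        rw [hlen, pyReverseSlice_cons x (pySwap ret (n : Int) (np : Int)) np]
        simp [PySem.List.len_eq]
      · rw [if_neg hcur, if_neg hcur]
        exact ih (fun j hj => h j (by simp [hj]))

lemma npOuterO_shift (x : Int) (l : List Int) :
    ∀ ps : List Int, (∀ p ∈ ps, 0 ≤ p) →
    npOuterO (x :: l) (ps.map (· + 1)) = (npOuterO l ps).map (fun r => x :: r) := by
  intro ps h
  induction ps with
  | nil => simp [npOuterO]
  | cons p rest ih =>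
    obtain ⟨n, rfl⟩ : ∃ n : Nat, p = (n : Int) := ⟨p.toNat, by have := h p (by simp); omega⟩
    simp only [List.map_cons, npOuterO, PySem.List.pyGet?_cons_succ]
    cases hg : PySem.List.pyGet? l (n : Int) with
    | none => simp
    | some pv =>
      simp only
      have hlen : PySem.List.len (x :: l) - 1 = (PySem.List.len l - 1) + 1 := by
        simp [PySem.List.len_eq]
      rw [hlen, pyRange_neg_shift]
      rw [npInner_shift x l pv n _ (fun i hi => by
        have := PySem.List.mem_pyRange_neg_one.mp hi; omega)]
      cases h2 : npInner l pv (n : Int) (PySem.List.pyRange (PySem.List.len l - 1) (n : Int) (-1)) with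
      | some r => simp [h2]
      | none =>
        simp only [h2, Option.map_none]
        exact ih (fun q hq => h q (by simp [hq]))

lemma pivot0_none (x : Int) (l : List Int) (h : ∀ y ∈ l, y ≤ x) :
    npOuterO (x :: l) [0] = none := by
  have hnone : npInner (x :: l) x 0 (PySem.List.pyRange (PySem.List.len (x :: l) - 1) 0 (-1)) = none := by
    apply npInner_none
    intro i hi c hc
    have hi' : (0 : Int) < i ∧ i ≤ (l.length : Int) := by
      have := PySem.List.mem_pyRange_neg_one.mp hi
      constructor
      · exact this.1
      · have h2 := this.2
        have : PySem.List.len (x :: l) - 1 = (l.length : Int) := by simp [PySem.List.len_eq]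
        omega
    obtain ⟨n, rfl⟩ : ∃ n : Nat, i = (n : Int) := ⟨i.toNat, by omega⟩
    have hn : 0 < n := by exact_mod_cast hi'.1
    obtain ⟨m, rfl⟩ : ∃ m : Nat, n = m + 1 := ⟨n - 1, by omega⟩
    rw [show ((m + 1 : Nat) : Int) = ((m : Nat) : Int) + 1 by push_cast; ring,
      PySem.List.pyGet?_cons_succ, PySem.List.pyGet?_natCast] at hc
    exact not_lt.mpr (h c (List.mem_of_getElem? hc))
  simp only [npOuterO, PySem.List.pyGet?_zero_cons]
  rw [hnone]

lemma pivot0_eval (x b : Int) (u v : List Int) (hb : x < b) (hv : ∀ y ∈ v, y ≤ x) :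
    npOuterO (x :: (u ++ b :: v)) [0] = some (b :: (u ++ x :: v).reverse) := by
  have hlen : PySem.List.len (x :: (u ++ b :: v)) - 1 = ((u.length + 1 + v.length : Nat) : Int) := by
    simp only [PySem.List.len_eq, List.length_cons, List.length_append]
    push_cast; ring
  have hsplit : PySem.List.pyRange ((u.length + 1 + v.length : Nat) : Int) 0 (-1)
      = PySem.List.pyRange ((u.length + 1 + v.length : Nat) : Int) ((u.length + 1 : Nat) : Int) (-1)
        ++ (((u.length + 1 : Nat) : Int) :: PySem.List.pyRange ((u.length : Nat) : Int) 0 (-1)) := by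
    rw [pyRange_neg_append _ ((u.length + 1 : Nat) : Int) _ (by push_cast; omega) (by push_cast; omega)]
    congr 1
    rw [PySem.List.pyRange_neg_one_cons (by push_cast; omega)]
    congr 2
    push_cast; ring
  have hskip : ∀ i ∈ PySem.List.pyRange ((u.length + 1 + v.length : Nat) : Int)
      ((u.length + 1 : Nat) : Int) (-1),
      ∃ c, PySem.List.pyGet? (x :: (u ++ b :: v)) i = some c ∧ ¬ x < c := by
    intro i hi
    have hi' := PySem.List.mem_pyRange_neg_one.mp hi
    obtain ⟨n, rfl⟩ : ∃ n : Nat, i = (n : Int) := ⟨i.toNat, by omega⟩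
    have hbd : u.length + 2 ≤ n ∧ n ≤ u.length + 1 + v.length := by omega
    have harr : x :: (u ++ b :: v) = ((x :: u) ++ [b]) ++ v := by simp
    rw [harr, PySem.List.pyGet?_natCast, List.getElem?_append_right (by simp; omega)]
    have hidx : n - ((x :: u) ++ [b]).length < v.length := by simp; omega
    rw [List.getElem?_eq_getElem hidx]
    exact ⟨_, rfl, not_lt.mpr (hv _ (List.getElem_mem _))⟩
  have hgetb : PySem.List.pyGet? (x :: (u ++ b :: v)) ((u.length + 1 : Nat) : Int) = some b := by
    have harr : x :: (u ++ b :: v) = (x :: u) ++ b :: v := by simp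
    have hl : ((u.length + 1 : Nat) : Int) = ((x :: u).length : Int) := by simp
    rw [harr, hl, PySem.List.pyGet?_append_length]
  have hswap : pySwap (x :: (u ++ b :: v)) ((u.length + 1 : Nat) : Int) 0 = b :: (u ++ x :: v) := by
    simp only [pySwap, hgetb, PySem.List.pyGet?_zero_cons,
      PySem.List.pySetD_natCast]
    rw [show ((0 : Int)) = (((0 : Nat) : Int)) from rfl, PySem.List.pySetD_natCast]
    rw [show (u.length + 1) = u.length + 1 from rfl]
    rw [List.set_cons_succ, List.set_append_right u.length x (le_refl _)]
    simp [List.set_cons_zero]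
  have hrs : pyReverseSlice (b :: (u ++ x :: v)) (0 + 1) (PySem.List.len (b :: (u ++ x :: v)))
      = b :: (u ++ x :: v).reverse := by
    simp only [pyReverseSlice, PySem.List.slice?_none_none_neg_one, Option.getD_some,
      PySem.List.len_eq]
    have hfull : PySem.List.slice (b :: (u ++ x :: v)) (some (0 + 1))
        (some (((b :: (u ++ x :: v)).length : Int) + 1)) = u ++ x :: v := by
      rw [slice_full_end _ _ _ (by omega) (by omega)]
      simp
    have hpre : PySem.List.slice (b :: (u ++ x :: v)) (some 0) (some (0 + 1)) = [b] := by
      rw [show ((0 : Int)) = (((0 : Nat) : Int)) from rfl]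
      rw [PySem.List.slice_toNat _ (by omega) (by omega)]
      simp
    rw [hfull, hpre]
    simp
  have hinner : npInner (x :: (u ++ b :: v)) x 0
      (PySem.List.pyRange (PySem.List.len (x :: (u ++ b :: v)) - 1) 0 (-1))
      = some (b :: (u ++ x :: v).reverse) := by
    rw [hlen, hsplit, npInner_skip _ _ _ _ _ hskip]
    simp only [npInner, hgetb, if_pos hb]
    rw [hswap, hrs]
  simp only [npOuterO, PySem.List.pyGet?_zero_cons]
  rw [hinner]

-- main characterisation of A's next-permutation scan
theorem npOuterO_spec : ∀ l : List Int,
    (WD l → npOuterO l (PySem.List.pyRange ((l.length : Int) - 2) (-1) (-1)) = none) ∧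
    (¬ WD l → ∃ r, npOuterO l (PySem.List.pyRange ((l.length : Int) - 2) (-1) (-1)) = some r ∧ IsNext l r) := by
  intro l
  induction l with
  | nil =>
    constructor
    · intro _
      rw [PySem.List.pyRange_neg_one_eq_nil (by simp)]
      rfl
    · intro h; exact absurd List.Pairwise.nil h
  | cons x l' ih =>
    rcases eq_or_ne l' [] with rfl | hne
    · constructor
      · intro _
        rw [PySem.List.pyRange_neg_one_eq_nil (by simp)]
        rfl
      · intro h; exact absurd (List.pairwise_singleton _ x) h
    · have hm : 1 ≤ l'.length := by
        cases l' with
        | nil => exact absurd rfl hne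
        | cons c t => simp
      have hrange : PySem.List.pyRange (((x :: l').length : Int) - 2) (-1) (-1)
          = (PySem.List.pyRange ((l'.length : Int) - 2) (-1) (-1)).map (· + 1) ++ [(0 : Int)] := by
        have h1 : ((x :: l').length : Int) - 2 = ((l'.length : Int) - 2) + 1 := by
          rw [List.length_cons]; push_cast; ring
        have h2 : PySem.List.pyRange (((l'.length : Int) - 2) + 1) 0 (-1)
            = (PySem.List.pyRange ((l'.length : Int) - 2) (-1) (-1)).map (· + 1) := by
          have h3 := pyRange_neg_shift ((l'.length : Int) - 2) (-1)
          simpa using h3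
        rw [h1, pyRange_neg_append _ 0 _ (by omega) (by omega), h2,
          PySem.List.pyRange_neg_one_cons (by omega : (-1 : Int) < 0),
          PySem.List.pyRange_neg_one_eq_nil (by omega : (0 : Int) - 1 ≤ -1)]
      have hsome : ∀ p ∈ (PySem.List.pyRange ((l'.length : Int) - 2) (-1) (-1)).map (· + 1),
          (PySem.List.pyGet? (x :: l') p).isSome := by
        intro p hp
        rw [List.mem_map] at hp
        obtain ⟨q, hq, rfl⟩ := hp
        have hq' := PySem.List.mem_pyRange_neg_one.mp hq
        obtain ⟨n, rfl⟩ : ∃ n : Nat, q = (n : Int) := ⟨q.toNat, by omega⟩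
        rw [PySem.List.pyGet?_cons_succ, PySem.List.pyGet?_natCast]
        have : n < l'.length := by omega
        simp [List.getElem?_eq_getElem this]
      have hshift := npOuterO_shift x l' (PySem.List.pyRange ((l'.length : Int) - 2) (-1) (-1))
        (fun p hp => by have := PySem.List.mem_pyRange_neg_one.mp hp; omega)
      constructor
      · intro hWD
        obtain ⟨hhd, htl⟩ := List.pairwise_cons.mp hWD
        rw [hrange, npOuterO_append _ _ _ hsome, hshift, ih.1 htl]
        simp only [Option.map_none]
        rw [pivot0_none x l' hhd]
        rfl
      · intro hnWD
        rw [hrange, npOuterO_append _ _ _ hsome, hshift]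
        by_cases hWDl' : WD l'
        · have hex : ∃ y ∈ l', x < y := by
            by_contra hno
            push_neg at hno
            exact hnWD (List.pairwise_cons.mpr ⟨fun y hy => hno y hy, hWDl'⟩)
          obtain ⟨u, b, v, rfl, hbb, hvv⟩ := wd_decomp x l' hWDl' hex
          rw [ih.1 hWDl']
          refine ⟨b :: (u ++ x :: v).reverse, ?_, isnext_pivot0 x b u v hWDl' hbb hvv⟩
          simp only [Option.map_none]
          rw [pivot0_eval x b u v hbb hvv]
          rfl
        · obtain ⟨r, hr, hnx⟩ := ih.2 hWDl'
          rw [hr]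
          exact ⟨x :: r, rfl, isnext_cons x l' r hnx⟩

theorem nextPerm_fix (l : List Int) (h : WD l) : getNextPermutation l = l := by
  rw [getNextPermutation, npOuter_eq_npOuterO, PySem.List.len_eq, (npOuterO_spec l).1 h]
  rfl

theorem nextPerm_isnext (l : List Int) (h : ¬ WD l) : IsNext l (getNextPermutation l) := by
  obtain ⟨r, hr, hnx⟩ := (npOuterO_spec l).2 h
  rw [getNextPermutation, npOuter_eq_npOuterO, PySem.List.len_eq, hr]
  exact hnx

-- ===== B-side characterisation =====

lemma mem_insertAll (x : Int) (p q : List Int) :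
    q ∈ insertAll x p ↔ ∃ n : Nat, n ≤ p.length ∧ q = p.take n ++ x :: p.drop n := by
  simp only [insertAll, List.mem_map]
  constructor
  · rintro ⟨i, hi, rfl⟩
    rw [PySem.List.len_eq] at hi
    have hi' : 0 ≤ i ∧ i < (p.length : Int) + 1 := PySem.List.mem_pyRange_one.mp hi
    refine ⟨i.toNat, by omega, ?_⟩
    rw [PySem.List.slice_to p hi'.1, PySem.List.slice_from p hi'.1]
    simp [List.append_assoc]
  · rintro ⟨n, hn, rfl⟩
    refine ⟨(n : Int), ?_, ?_⟩
    · rw [PySem.List.len_eq, PySem.List.mem_pyRange_one]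
      omega
    · rw [PySem.List.slice_to p (by omega), PySem.List.slice_from p (by omega)]
      simp [List.append_assoc]

def Pset (start : List Int) : PySem.Set (List Int) :=
  start.foldl (fun perms x => PySem.Set.ofList (perms.flatMap (insertAll x))) (PySem.Set.ofList [[]])

lemma mem_Pset : ∀ (start : List Int), ∀ q, q ∈ Pset start ↔ q.Perm start := by
  intro start
  induction start using List.reverseRecOn with
  | nil =>
    intro q
    rw [show Pset [] = PySem.Set.ofList [[]] from rfl, PySem.Set.mem_ofList]
    simp [List.perm_nil]
  | append_singleton l x ih =>
    intro q
    rw [show Pset (l ++ [x]) = PySem.Set.ofList ((Pset l).flatMap (insertAll x)) from by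
      simp [Pset, List.foldl_append]]
    rw [PySem.Set.mem_ofList, List.mem_flatMap]
    have hperm_lx : (l ++ [x]).Perm (x :: l) := by
      simpa using (List.perm_middle (a := x) (l₁ := l) (l₂ := ([] : List Int)))
    constructor
    · rintro ⟨p, hp, hq⟩
      obtain ⟨n, hn, rfl⟩ := (mem_insertAll x p _).mp hq
      have hperm : (p.take n ++ x :: p.drop n).Perm (x :: p) := by
        have h := List.perm_middle (a := x) (l₁ := p.take n) (l₂ := p.drop n)
        simpa [List.take_append_drop] using h
      exact (hperm.trans (((ih p).mp hp).cons x)).trans hperm_lx.symm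
    · intro hq
      have hx : x ∈ q := hq.mem_iff.mpr (by simp)
      obtain ⟨s, t, rfl⟩ := List.append_of_mem hx
      have hst : (s ++ t).Perm l := by
        have h1 : (s ++ x :: t).Perm (x :: (s ++ t)) := List.perm_middle
        have h3 : (x :: (s ++ t)).Perm (x :: l) := h1.symm.trans (hq.trans hperm_lx)
        exact h3.cons_inv
      refine ⟨s ++ t, (ih _).mpr hst, (mem_insertAll x _ _).mpr ⟨s.length, by simp, ?_⟩⟩
      rw [List.take_left, List.drop_left]

lemma nodup_Pset (start : List Int) : (Pset start).Nodup := by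
  induction start using List.reverseRecOn with
  | nil => exact PySem.Set.nodup_ofList _
  | append_singleton l x _ =>
    rw [show Pset (l ++ [x]) = PySem.Set.ofList ((Pset l).flatMap (insertAll x)) from by
      simp [Pset, List.foldl_append]]
    exact PySem.Set.nodup_ofList _

def PL (start : List Int) : List (List Int) := PySem.List.sorted (Pset start) (fun p => p) false

-- Pairwise (≤) of PL, bridging the default list-order instances with the LinearOrder
-- instance under which sorted_pairwise is stated (both decide the same lexicographic test)
lemma pairwise_le_PL (start : List Int) : (PL start).Pairwise (· ≤ ·) := by
  have h := PySem.List.sorted_pairwise (Pset start) (fun p : List Int => p)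
  show (PySem.List.sorted (Pset start) (fun p => p) false).Pairwise (· ≤ ·)
  simp only [PySem.List.sorted_eq_foldl_insertBy] at h ⊢
  convert h using 2
  congr 1
  funext acc y
  congr 1
  funext a c
  exact decide_eq_decide.mpr ⟨fun hh => hh, fun hh => hh⟩

lemma mem_PL (start : List Int) (q : List Int) : q ∈ PL start ↔ q.Perm start := by
  rw [PL, PySem.List.mem_sorted]
  exact mem_Pset start q

lemma pairwise_lt_PL (start : List Int) : (PL start).Pairwise (· < ·) := by
  have hle : (PL start).Pairwise (· ≤ ·) := pairwise_le_PL start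
  have hnd : (PL start).Nodup :=
    ((PySem.List.sorted_perm (Pset start) (fun p : List Int => p) false).nodup_iff).mpr
      (nodup_Pset start)
  exact (hle.and hnd).imp (fun h => lt_of_le_of_ne h.1 h.2)

lemma length_PL_le (start : List Int) : (PL start).length ≤ Nat.factorial start.length := by
  have h1 : (PL start).length = (Pset start).length :=
    (PySem.List.sorted_perm (Pset start) (fun p : List Int => p) false).length_eq
  have hsub : (Pset start).toFinset ⊆ (List.permutations start).toFinset := by
    intro q hq
    rw [List.mem_toFinset] at *
    exact List.mem_permutations.mpr ((mem_Pset start q).mp hq)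
  calc (PL start).length = (Pset start).length := h1
    _ = (Pset start).toFinset.card := (List.toFinset_card_of_nodup (nodup_Pset start)).symm
    _ ≤ (List.permutations start).toFinset.card := Finset.card_le_card hsub
    _ ≤ (List.permutations start).length := List.toFinset_card_le _
    _ = Nat.factorial start.length := List.length_permutations start

lemma filter_split (start np : List Int) (hnp : np ∈ PL start) :
    (PL start).filter (fun q => decide (np ≤ q)) = np :: (PL start).filter (fun q => decide (np < q)) := by
  obtain ⟨P1, P2, hPL⟩ := List.append_of_mem hnp
  have hpw := pairwise_lt_PL start
  rw [hPL] at hpw ⊢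
  rw [List.pairwise_append] at hpw
  obtain ⟨h1, h2, h12⟩ := hpw
  have hlt1 : ∀ a ∈ P1, a < np := fun a ha => h12 a ha np (by simp)
  have hlt2 : ∀ c ∈ P2, np < c := (List.pairwise_cons.mp h2).1
  rw [List.filter_append, List.filter_append, List.filter_cons, List.filter_cons]
  have e1 : P1.filter (fun q => decide (np ≤ q)) = [] :=
    List.filter_eq_nil_iff.mpr (fun a ha => by
      simp only [decide_eq_true_eq]; exact not_le.mpr (hlt1 a ha))
  have e2 : P1.filter (fun q => decide (np < q)) = [] :=
    List.filter_eq_nil_iff.mpr (fun a ha => by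
      simp only [decide_eq_true_eq]; exact not_lt.mpr (hlt1 a ha).le)
  have e3 : P2.filter (fun q => decide (np ≤ q)) = P2 :=
    List.filter_eq_self.mpr (fun c hc => by
      simp only [decide_eq_true_eq]; exact (hlt2 c hc).le)
  have e4 : P2.filter (fun q => decide (np < q)) = P2 :=
    List.filter_eq_self.mpr (fun c hc => by
      simp only [decide_eq_true_eq]; exact hlt2 c hc)
  rw [e1, e2, e3, e4]
  simp [lt_irrefl]

lemma filter_step (start np nxt : List Int) (hnxt : nxt ∈ PL start)
    (hmin : ∀ k : List Int, k.Perm np → np < k → nxt ≤ k) (hnp : np < nxt)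
    (hperm : np.Perm start) :
    (PL start).filter (fun q => decide (np < q)) = nxt :: (PL start).filter (fun q => decide (nxt < q)) := by
  obtain ⟨P1, P2, hPL⟩ := List.append_of_mem hnxt
  have hpw := pairwise_lt_PL start
  have hmem : ∀ a ∈ P1, a ∈ PL start := fun a ha => by
    rw [hPL]; exact List.mem_append.mpr (Or.inl ha)
  rw [hPL] at hpw ⊢
  rw [List.pairwise_append] at hpw
  obtain ⟨h1, h2, h12⟩ := hpw
  have hlt1 : ∀ a ∈ P1, a < nxt := fun a ha => h12 a ha nxt (by simp)
  have hlt2 : ∀ c ∈ P2, nxt < c := (List.pairwise_cons.mp h2).1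
  rw [List.filter_append, List.filter_append, List.filter_cons, List.filter_cons]
  have e1 : P1.filter (fun q => decide (np < q)) = [] :=
    List.filter_eq_nil_iff.mpr (fun a ha => by
      simp only [decide_eq_true_eq]
      intro hlt
      have hka : a.Perm np := ((mem_PL start a).mp (hmem a ha)).trans hperm.symm
      exact absurd (hmin a hka hlt) (not_le.mpr (hlt1 a ha)))
  have e2 : P1.filter (fun q => decide (nxt < q)) = [] :=
    List.filter_eq_nil_iff.mpr (fun a ha => by
      simp only [decide_eq_true_eq]; exact not_lt.mpr (hlt1 a ha).le)
  have e3 : P2.filter (fun q => decide (np < q)) = P2 :=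
    List.filter_eq_self.mpr (fun c hc => by
      simp only [decide_eq_true_eq]; exact hnp.trans (hlt2 c hc))
  have e4 : P2.filter (fun q => decide (nxt < q)) = P2 :=
    List.filter_eq_self.mpr (fun c hc => by
      simp only [decide_eq_true_eq]; exact hlt2 c hc)
  rw [e1, e2, e3, e4]
  simp [hnp, lt_irrefl]

-- the chain lemma: A's while-loop collects exactly the permutations above np, in order
lemma gapLoop_eq (start : List Int) : ∀ (fuel : Nat) (acc : List (List Int)) (np : List Int),
    np.Perm start → ((PL start).filter (fun q => decide (np < q))).length < fuel →
    gapLoop fuel acc np = acc ++ (PL start).filter (fun q => decide (np < q)) := by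
  intro fuel
  induction fuel with
  | zero => intro acc np _ h; omega
  | succ f ih =>
    intro acc np hperm hlen
    by_cases hwd : WD np
    · have hfil : (PL start).filter (fun q => decide (np < q)) = [] :=
        List.filter_eq_nil_iff.mpr (fun q hq => by
          simp only [decide_eq_true_eq]
          exact not_lt.mpr (wd_ge_lex np q hwd (((mem_PL start q).mp hq).trans hperm.symm)))
      simp [gapLoop, nextPerm_fix np hwd, hfil]
    · obtain ⟨hp, hlt, hmin⟩ := nextPerm_isnext np hwd
      have hne : np ≠ getNextPermutation np := ne_of_lt hlt
      have hstep := filter_step start np (getNextPermutation np)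
        ((mem_PL start _).mpr (hp.trans hperm)) hmin hlt hperm
      rw [hstep] at hlen ⊢
      simp only [gapLoop, if_neg hne]
      rw [ih (acc ++ [getNextPermutation np]) _ (hp.trans hperm)
        (by simp at hlen; omega)]
      simp

-- ===== VERDICT =====
theorem getAllPerms_spec : Claim_equal_getAllPerms := by
  intro nextPerm _
  show getAllPerms nextPerm = getAllPerms_alt nextPerm
  have hb : getAllPerms_alt nextPerm = (PL nextPerm).filter (fun q => decide (nextPerm ≤ q)) := rfl
  have hstart : nextPerm ∈ PL nextPerm := (mem_PL _ _).mpr (List.Perm.refl _)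
  have hbound : ((PL nextPerm).filter (fun q => decide (nextPerm < q))).length
      < Nat.factorial nextPerm.length + 1 := by
    have h1 := List.length_filter_le (fun q => decide (nextPerm < q)) (PL nextPerm)
    have h2 := length_PL_le nextPerm
    omega
  rw [hb, filter_split nextPerm nextPerm hstart]
  show gapLoop (Nat.factorial nextPerm.length + 1) [nextPerm] nextPerm = _
  rw [gapLoop_eq nextPerm (Nat.factorial nextPerm.length + 1) [nextPerm] nextPerm
    (List.Perm.refl _) hbound]
  rfl
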